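-- pv_equiv track=rewrite | github.com/davidkaplandk/pronuncise_research | eval/eval_models.py | boundary_positions
-- ===== SOURCE A (Python) =====
-- from typing import List, Tuple, Dict, Optional
--
-- WORD_DELIM = "|"
--
-- def boundary_positions(tokens: List[str], word_delim: str = WORD_DELIM) -> List[int]:
--     """
--     Represent each boundary by the cumulative #phones BEFORE it (excluding delimiters).
--     """
--     pos = []
--     nphones = 0
--     for t in tokens:
--         if t == word_delim:
--             pos.append(nphones)
--         else:
--             nphones += 1
--     return pos
-- ===== SOURCE B (Python) =====
-- WORD_DELIM = "|"
--
-- def boundary_positions(tokens, word_delim=WORD_DELIM):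
--     # Two-pass: build a prefix table of cumulative phone counts, then
--     # collect the table entries at delimiter positions.
--     cum = []
--     c = 0
--     for t in tokens:
--         if t != word_delim:
--             c += 1
--         cum.append(c)
--     return [cum[i] for i, t in enumerate(tokens) if t == word_delim]
-- ===== Notes on version B (the rewrite author's own statement) =====
-- stated objective: alternative
-- what changed: Replaces A's single accumulating loop (append at each delimiter) with a prefix table of cumulative phone counts built first, then a second filtering pass reading the table at delimiter positions.
import Mathlib
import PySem

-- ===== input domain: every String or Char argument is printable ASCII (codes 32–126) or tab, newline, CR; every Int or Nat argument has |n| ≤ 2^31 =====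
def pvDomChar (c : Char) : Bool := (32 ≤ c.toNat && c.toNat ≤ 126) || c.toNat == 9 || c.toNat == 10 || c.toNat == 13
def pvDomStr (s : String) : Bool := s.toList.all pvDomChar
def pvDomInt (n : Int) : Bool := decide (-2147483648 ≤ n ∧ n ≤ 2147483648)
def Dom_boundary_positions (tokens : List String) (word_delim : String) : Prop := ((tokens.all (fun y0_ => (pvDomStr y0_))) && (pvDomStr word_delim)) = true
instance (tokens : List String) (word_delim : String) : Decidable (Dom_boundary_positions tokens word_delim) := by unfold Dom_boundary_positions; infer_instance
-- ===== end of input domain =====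

-- B (objective: alternative) replaces A's single accumulating loop with a prefix table of cumulative phone counts plus a second filtering pass over delimiter positions; same O(n) cost.


-- ===== PORT A =====
def boundary_positions (tokens : List String) (word_delim : String) : List Int :=
  (tokens.foldl
    (fun (st : List Int × Int) t =>
      if t == word_delim then (st.1 ++ [st.2], st.2) else (st.1, st.2 + 1))
    ([], 0)).1

-- ===== PORT B =====
-- prefix table of cumulative phone counts (B's first pass)
def cumCounts (tokens : List String) (word_delim : String) (c : Int) : List Int :=
  match tokens with
  | [] => []
  | t :: ts =>
      let c' := if t != word_delim then c + 1 else c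
      c' :: cumCounts ts word_delim c'

def boundary_positions_alt (tokens : List String) (word_delim : String) : List Int :=
  ((tokens.zip (cumCounts tokens word_delim 0)).filter
    (fun p => p.1 == word_delim)).map Prod.snd

-- ===== PRECONDITION & SPEC =====
def Spec_boundary_positions (tokens : List String) (word_delim : String) (out : List Int) : Prop := out = boundary_positions_alt tokens word_delim
instance (tokens : List String) (word_delim : String) (out : List Int) : Decidable (Spec_boundary_positions tokens word_delim out) := by unfold Spec_boundary_positions; infer_instance

-- ===== CLAIM (what is proved, stated in full; the proofs are below) =====
def Claim_equal_boundary_positions : Prop := ∀ (tokens : List String) (word_delim : String), Dom_boundary_positions tokens word_delim → Spec_boundary_positions tokens word_delim (boundary_positions tokens word_delim)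

-- ===== LEMMAS AND PROOFS =====

-- ===== VERDICT (by name: the statement is the Claim_ definition above) =====
theorem cumCounts_cons (t : String) (ts : List String) (wd : String) (c : Int) :
    cumCounts (t :: ts) wd c
      = (if t != wd then c + 1 else c) :: cumCounts ts wd (if t != wd then c + 1 else c) := rfl

theorem bp_loop (word_delim : String) :
    ∀ (ts : List String) (acc : List Int) (c : Int),
      (ts.foldl
        (fun (st : List Int × Int) t =>
          if t == word_delim then (st.1 ++ [st.2], st.2) else (st.1, st.2 + 1))
        (acc, c)).1
      = acc ++ ((ts.zip (cumCounts ts word_delim c)).filter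
          (fun p => p.1 == word_delim)).map Prod.snd := by
  intro ts
  induction ts with
  | nil => intro acc c; simp [cumCounts]
  | cons t ts ih =>
      intro acc c
      rw [List.foldl_cons, cumCounts_cons, List.zip_cons_cons, List.filter_cons]
      by_cases h : (t == word_delim) = true
      · have hb : (t != word_delim) = false := by
          simp only [bne, h, Bool.not_true]
        rw [hb, if_pos h, ih]
        simp only [Bool.false_eq_true, if_false, h, if_true, List.map_cons,
          List.append_assoc, List.singleton_append]
      · have hb : (t != word_delim) = true := by
          simp only [bne, Bool.not_eq_true']
          exact Bool.not_eq_true _ ▸ h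
        rw [hb, if_neg h, ih]
        simp only [if_true, h, Bool.false_eq_true, if_false]

theorem boundary_positions_spec : Claim_equal_boundary_positions := by
  intro tokens word_delim _
  unfold Spec_boundary_positions boundary_positions boundary_positions_alt
  simpa using bp_loop word_delim tokens [] 0
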